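-- pv_equiv track=rewrite | github.com/Diego-Llanes/lexicographic_names | main.py | find_top_n_longest_lexi_names
-- ===== SOURCE A (Python) =====
-- def find_top_n_longest_lexi_names(
--     names: list[tuple[str, str, int]],
--     n: int = 5,
--     verbose: bool = True,
-- ) -> list[str]:
--     lexi_sorted_names = []
--     for name, gender, count in names:
--         if name.lower() == ''.join(sorted(name.lower())):
--             lexi_sorted_names.append((name, gender, count,))
--
--     long_sorted_names = sorted(
--         lexi_sorted_names,
--         key=lambda row: len(row[0]),
--         reverse=True,
--     )
--     return long_sorted_names[:n]
-- ===== SOURCE B (Python) =====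
-- def find_top_n_longest_lexi_names(
--     names: list[tuple[str, str, int]],
--     n: int = 5,
--     verbose: bool = True,
-- ) -> list[str]:
--     def monotone(s):
--         return all(a <= b for a, b in zip(s, s[1:]))
--
--     keep = [row for row in names if monotone(row[0].lower())]
--     return sorted(keep, key=lambda row: len(row[0]), reverse=True)[:n]
-- ===== Notes on version B (the rewrite author's own statement) =====
-- stated objective: idiomatic
-- what changed: The sortedness test 'name.lower() == ''.join(sorted(name.lower()))' (build a fully sorted copy, compare) is replaced by a single linear scan checking every adjacent pair of characters is non-decreasing; the filter becomes a comprehension.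
import Mathlib
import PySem

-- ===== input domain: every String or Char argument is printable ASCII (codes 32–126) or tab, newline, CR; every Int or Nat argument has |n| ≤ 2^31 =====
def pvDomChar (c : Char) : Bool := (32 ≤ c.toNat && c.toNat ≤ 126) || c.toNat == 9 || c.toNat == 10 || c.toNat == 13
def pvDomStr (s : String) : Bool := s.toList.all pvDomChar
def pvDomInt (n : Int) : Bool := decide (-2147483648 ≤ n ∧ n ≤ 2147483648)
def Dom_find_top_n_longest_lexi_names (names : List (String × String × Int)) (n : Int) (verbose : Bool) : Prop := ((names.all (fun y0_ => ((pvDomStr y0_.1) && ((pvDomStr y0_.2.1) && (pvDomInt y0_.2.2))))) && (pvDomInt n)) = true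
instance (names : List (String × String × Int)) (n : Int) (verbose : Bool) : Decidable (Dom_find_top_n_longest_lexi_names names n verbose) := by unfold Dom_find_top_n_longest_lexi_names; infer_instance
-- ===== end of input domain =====

-- ===== PORT A =====
def find_top_n_longest_lexi_names (names : List (String × String × Int)) (n : Int) (verbose : Bool) : List (String × String × Int) :=
  let lexi_sorted_names := names.foldl (fun acc row =>
    if (PySem.Str.lower row.1).toList == PySem.List.sorted (PySem.Str.lower row.1).toList (fun c => c) false
    then acc ++ [row] else acc) []
  let long_sorted_names := PySem.List.sorted lexi_sorted_names (fun row => PySem.Str.len row.1) true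
  PySem.List.slice long_sorted_names none (some n)

-- ===== PORT B =====
-- B replaces sort-and-compare with a linear adjacent-pair monotonicity scan
def pvMonotone (s : List Char) : Bool := (s.zip s.tail).all (fun p => p.1 ≤ p.2)

def find_top_n_longest_lexi_names_alt (names : List (String × String × Int)) (n : Int) (verbose : Bool) : List (String × String × Int) :=
  let keep := names.filter (fun row => pvMonotone (PySem.Str.lower row.1).toList)
  PySem.List.slice (PySem.List.sorted keep (fun row => PySem.Str.len row.1) true) none (some n)

-- ===== PRECONDITION & SPEC =====
def Spec_find_top_n_longest_lexi_names (names : List (String × String × Int)) (n : Int) (verbose : Bool) (out : List (String × String × Int)) : Prop := out = find_top_n_longest_lexi_names_alt names n verbose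
instance (names : List (String × String × Int)) (n : Int) (verbose : Bool) (out : List (String × String × Int)) : Decidable (Spec_find_top_n_longest_lexi_names names n verbose out) := by unfold Spec_find_top_n_longest_lexi_names; infer_instance

-- ===== CLAIM (what is proved, stated in full; the proofs are below) =====
def Claim_equal_find_top_n_longest_lexi_names : Prop := ∀ (names : List (String × String × Int)) (n : Int) (verbose : Bool), Dom_find_top_n_longest_lexi_names names n verbose → Spec_find_top_n_longest_lexi_names names n verbose (find_top_n_longest_lexi_names names n verbose)

-- ===== LEMMAS AND PROOFS =====

-- ===== VERDICT (by name: the statement is the Claim_ definition above) =====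
lemma pvMonotone_iff_pairwise (l : List Char) :
    pvMonotone l = true ↔ l.Pairwise (· ≤ ·) := by
  rw [← List.isChain_iff_pairwise]
  unfold pvMonotone
  induction l with
  | nil => simp
  | cons a t ih =>
    cases t with
    | nil => simp
    | cons b u =>
      simp only [List.tail_cons, List.zip_cons_cons, List.all_cons, List.isChain_cons_cons,
        Bool.and_eq_true, decide_eq_true_eq] at ih ⊢
      rw [ih]

lemma pred_eq (l : List Char) :
    (l == PySem.List.sorted l (fun c => c) false) = pvMonotone l := by
  by_cases h : l.Pairwise (· ≤ ·)
  · rw [(pvMonotone_iff_pairwise l).mpr h,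
      PySem.List.sorted_eq_self_of_pairwise l (fun c => c) (by simpa using h)]
    simp
  · have h2 : pvMonotone l ≠ true := fun hm => h ((pvMonotone_iff_pairwise l).mp hm)
    have h1 : (l == PySem.List.sorted l (fun c => c) false) ≠ true := by
      intro he
      apply h
      have := PySem.List.sorted_pairwise l (fun c => c)
      rw [← eq_of_beq he] at this
      simpa using this
    simp only [Bool.not_eq_true] at h1 h2
    rw [h1, h2]

theorem find_top_n_longest_lexi_names_spec : Claim_equal_find_top_n_longest_lexi_names := by
  intro names n verbose _
  unfold Spec_find_top_n_longest_lexi_names find_top_n_longest_lexi_names find_top_n_longest_lexi_names_alt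
  rw [PySem.List.foldl_append_if_eq_filter]
  simp only [List.nil_append]
  congr 2
  exact List.filter_congr (fun row _ => pred_eq _)
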